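-- pv_equiv track=rewrite | github.com/gauravkuwar/RISCV-Sim | simulator.py | controlUnit
-- ===== SOURCE A (Python) =====
-- def controlUnit(opcode):
--     out = {x:0 for x in ('RegWrite', 'ALUOp', 'ALUSrc', 'MemToReg', 'MemRead', 'MemWrite', 'Branch')}
--     if opcode == 0x33: # R
--         out['RegWrite'] = 1
--         out['ALUOp'] = 0b10
--
--     if opcode == 0x13: # I
--         out['RegWrite'] = 1
--         out['ALUSrc'] = 1
--
--     if opcode == 0x3: # lw
--         out['ALUSrc'] = 1
--         out['MemToReg'] = 1
--         out['RegWrite'] = 1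
--         out['MemRead'] = 1
--
--     if opcode == 0x23: # sw
--         out['ALUSrc'] = 1
--         out['MemWrite'] = 1
--
--     if opcode == 0x63: # beq/bne
--         out['Branch'] = 1
--         out['ALUOp'] = 0b01
--
--     if opcode == 0x6f: # jal
--         out['RegWrite'] = 1
--         out['Branch'] = 1
--
--     return out
-- ===== SOURCE B (Python) =====
-- # B: combinational decode. Instead of a branch per opcode, each control signal is
-- # computed as a boolean/arithmetic function of the opcode's bit fields (bits 2,4,5,6),
-- # gated by opcode validity - the way hardware control logic is actually synthesized.
--
-- _VALID = frozenset((0x33, 0x13, 0x03, 0x23, 0x63, 0x6f))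
--
-- def controlUnit(opcode):
--     if opcode in _VALID:
--         b2 = (opcode >> 2) & 1
--         b4 = (opcode >> 4) & 1
--         b5 = (opcode >> 5) & 1
--         b6 = (opcode >> 6) & 1
--         reg_write = 1 - (b5 & (1 - b4) & (1 - b2))
--         alu_op    = 2 * (b4 & b5) + (b6 & (1 - b2))
--         alu_src   = (1 - b6) & (1 - (b4 & b5))
--         mem       = (1 - b4) & (1 - b5) & (1 - b6)
--         mem_write = b5 & (1 - b4) & (1 - b6)
--         branch    = b6
--     else:
--         reg_write = alu_op = alu_src = mem = mem_write = branch = 0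
--     return {'RegWrite': reg_write, 'ALUOp': alu_op, 'ALUSrc': alu_src,
--             'MemToReg': mem, 'MemRead': mem, 'MemWrite': mem_write, 'Branch': branch}
-- ===== Notes on version B (the rewrite author's own statement) =====
-- stated objective: alternative
-- what changed: The per-opcode if chain mutating a dict is replaced by combinational logic: each control signal is computed once as a boolean/arithmetic expression of the opcode's bit fields (bits 2,4,5,6), gated by opcode validity, as hardware decode logic would be.
import Mathlib
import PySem

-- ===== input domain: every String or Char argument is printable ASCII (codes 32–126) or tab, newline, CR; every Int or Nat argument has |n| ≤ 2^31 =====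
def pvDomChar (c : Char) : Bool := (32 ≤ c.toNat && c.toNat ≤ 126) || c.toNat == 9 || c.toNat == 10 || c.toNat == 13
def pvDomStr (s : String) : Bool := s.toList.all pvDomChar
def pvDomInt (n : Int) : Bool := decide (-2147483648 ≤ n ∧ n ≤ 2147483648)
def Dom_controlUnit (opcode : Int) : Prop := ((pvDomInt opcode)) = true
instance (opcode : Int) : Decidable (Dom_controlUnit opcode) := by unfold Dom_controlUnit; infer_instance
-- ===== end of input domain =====

-- B replaces A's per-opcode if chain by combinational logic: each signal is one
-- boolean/arithmetic expression of the opcode's bit fields, gated by validity (alternative; same O(1) cost).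

-- ===== PORT A =====
def controlUnit (opcode : Int) : List (String × Int) :=
  -- out = {x:0 for x in (...)}
  let out : PySem.Dict String Int :=
    ["RegWrite", "ALUOp", "ALUSrc", "MemToReg", "MemRead", "MemWrite", "Branch"].foldl
      (fun d x => d.insert x 0) PySem.Dict.empty
  let out := if opcode = 0x33 then (out.insert "RegWrite" 1).insert "ALUOp" 2 else out
  let out := if opcode = 0x13 then (out.insert "RegWrite" 1).insert "ALUSrc" 1 else out
  let out := if opcode = 0x3 then
      (((out.insert "ALUSrc" 1).insert "MemToReg" 1).insert "RegWrite" 1).insert "MemRead" 1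
    else out
  let out := if opcode = 0x23 then (out.insert "ALUSrc" 1).insert "MemWrite" 1 else out
  let out := if opcode = 0x63 then (out.insert "Branch" 1).insert "ALUOp" 1 else out
  let out := if opcode = 0x6f then (out.insert "RegWrite" 1).insert "Branch" 1 else out
  out.items

-- ===== PORT B =====
-- _VALID = frozenset((0x33, 0x13, 0x03, 0x23, 0x63, 0x6f))
def controlUnitValid : PySem.Set Int :=
  PySem.Set.ofList [0x33, 0x13, 0x03, 0x23, 0x63, 0x6f]

def controlUnit_alt (opcode : Int) : List (String × Int) :=
  let sig : Int × Int × Int × Int × Int × Int :=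
    if opcode ∈ controlUnitValid then
      let b2 := PySem.Int.band (opcode >>> (2:Nat)) 1
      let b4 := PySem.Int.band (opcode >>> (4:Nat)) 1
      let b5 := PySem.Int.band (opcode >>> (5:Nat)) 1
      let b6 := PySem.Int.band (opcode >>> (6:Nat)) 1
      ( 1 - PySem.Int.band (PySem.Int.band b5 (1 - b4)) (1 - b2)     -- reg_write
      , 2 * PySem.Int.band b4 b5 + PySem.Int.band b6 (1 - b2)       -- alu_op
      , PySem.Int.band (1 - b6) (1 - PySem.Int.band b4 b5)          -- alu_src
      , PySem.Int.band (PySem.Int.band (1 - b4) (1 - b5)) (1 - b6)  -- mem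
      , PySem.Int.band (PySem.Int.band b5 (1 - b4)) (1 - b6)        -- mem_write
      , b6 )                                                        -- branch
    else (0, 0, 0, 0, 0, 0)
  match sig with
  | (reg_write, alu_op, alu_src, mem, mem_write, branch) =>
    [("RegWrite", reg_write), ("ALUOp", alu_op), ("ALUSrc", alu_src),
     ("MemToReg", mem), ("MemRead", mem), ("MemWrite", mem_write), ("Branch", branch)]

-- ===== PRECONDITION & SPEC =====
def Spec_controlUnit (opcode : Int) (out : List (String × Int)) : Prop := out = controlUnit_alt opcode
instance (opcode : Int) (out : List (String × Int)) : Decidable (Spec_controlUnit opcode out) := by unfold Spec_controlUnit; infer_instance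

-- ===== CLAIM (what is proved, stated in full; the proofs are below) =====
def Claim_equal_controlUnit : Prop := ∀ (opcode : Int), Dom_controlUnit opcode → Spec_controlUnit opcode (controlUnit opcode)

-- ===== LEMMAS AND PROOFS =====

-- ===== VERDICT (by name: the statement is the Claim_ definition above) =====
theorem controlUnit_spec : Claim_equal_controlUnit := by
  intro opcode _
  unfold Spec_controlUnit
  by_cases h1 : opcode = 0x33
  · subst h1; decide
  by_cases h2 : opcode = 0x13
  · subst h2; decide
  by_cases h3 : opcode = 0x3
  · subst h3; decide
  by_cases h4 : opcode = 0x23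
  · subst h4; decide
  by_cases h5 : opcode = 0x63
  · subst h5; decide
  by_cases h6 : opcode = 0x6f
  · subst h6; decide
  have hv : opcode ∉ controlUnitValid := by
    intro hmem
    have : controlUnitValid = [51, 19, 3, 35, 99, 111] := by decide
    rw [this] at hmem
    simp only [List.mem_cons, List.not_mem_nil, or_false] at hmem
    rcases hmem with h|h|h|h|h|h <;> simp_all
  unfold controlUnit controlUnit_alt
  simp only [if_neg h1, if_neg h2, if_neg h3, if_neg h4, if_neg h5, if_neg h6, if_neg hv]
  rfl
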